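-- pv_equiv track=rewrite | github.com/giraffe70/nc_time_estimate | src/nc_time_twin/core/parser/tokenizer.py | _find_unparsed
-- ===== SOURCE A (Python) =====
-- def _find_unparsed(text: str, spans: list[tuple[int, int]]) -> str:
--     if not text:
--         return ""
--     covered = [False] * len(text)
--     for start, end in spans:
--         for index in range(start, end):
--             covered[index] = True
--     parts: list[str] = []
--     current = []
--     for char, is_covered in zip(text, covered, strict=True):
--         if not is_covered:
--             current.append(char)
--         elif current:
--             parts.append("".join(current))
--             current = []
--     if current:
--         parts.append("".join(current))
--     return " ".join(part for part in parts if part.strip())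
-- ===== SOURCE B (Python) =====
-- def _find_unparsed(text: str, spans: list[tuple[int, int]]) -> str:
--     # Difference-array sweep: +1/-1 at clipped span endpoints, then one running-depth pass.
--     if not text:
--         return ""
--     n = len(text)
--     diff = [0] * (n + 1)
--     for start, end in spans:
--         lo, hi = max(start, 0), min(end, n)
--         if lo < hi:
--             diff[lo] += 1
--             diff[hi] -= 1
--     parts = []
--     buf = []
--     depth = 0
--     for i, ch in enumerate(text):
--         depth += diff[i]
--         if depth == 0:
--             buf.append(ch)
--         elif buf:
--             parts.append("".join(buf))
--             buf = []
--     if buf: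
--         parts.append("".join(buf))
--     return " ".join(p for p in parts if p.strip())
-- ===== Notes on version B (the rewrite author's own statement) =====
-- stated objective: alternative
-- what changed: B replaces A's per-index boolean marking of every covered position by a difference-array sweep: each span adds +1/-1 at its clipped endpoints and a single running-depth pass over the text emits the uncovered segments.
-- outside the precondition, e.g. on _find_unparsed('ab', [(-1, 1)]): A returns '', B returns 'b'
import Mathlib
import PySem

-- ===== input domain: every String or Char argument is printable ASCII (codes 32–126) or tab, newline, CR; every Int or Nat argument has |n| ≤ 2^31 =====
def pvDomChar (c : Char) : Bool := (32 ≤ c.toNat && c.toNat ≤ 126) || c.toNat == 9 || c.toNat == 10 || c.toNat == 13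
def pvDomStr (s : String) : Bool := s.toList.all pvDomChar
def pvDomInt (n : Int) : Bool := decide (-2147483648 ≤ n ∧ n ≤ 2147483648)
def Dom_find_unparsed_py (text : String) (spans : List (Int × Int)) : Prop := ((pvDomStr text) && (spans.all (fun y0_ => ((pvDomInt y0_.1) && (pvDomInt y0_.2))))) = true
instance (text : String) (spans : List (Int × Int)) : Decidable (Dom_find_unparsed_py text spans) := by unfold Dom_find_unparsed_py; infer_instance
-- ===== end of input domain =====

-- B replaces A's per-index covered-boolean marking by a difference-array sweep
-- (+1/-1 at span endpoints, running depth); return values agree on Pre_.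

-- ===== PORT A =====
-- state step for A's char/covered accumulation loop
def aStep (st : List (List Char) × List Char) (cb : Char × Bool) : List (List Char) × List Char :=
  if cb.2 = false then (st.1, st.2 ++ [cb.1])
  else if st.2 ≠ [] then (st.1 ++ [st.2], ([] : List Char))
  else st

-- marks covered[index] = True for index in range(start, end)  (Python index semantics via pySetD)
def aMark (c : List Bool) (se : Int × Int) : List Bool :=
  (PySem.List.pyRange se.1 se.2 1).foldl (fun c i => PySem.List.pySetD c i true) c

def find_unparsed_py (text : String) (spans : List (Int × Int)) : String :=
  if text = "" then "" else
  let chars := text.toList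
  let n := chars.length
  let covered := spans.foldl aMark (List.replicate n false)
  let st := (chars.zip covered).foldl aStep (([] : List (List Char)), ([] : List Char))
  let parts := if st.2 ≠ [] then st.1 ++ [st.2] else st.1
  String.ofList (PySem.Chars.join [' '] (parts.filter (fun p => PySem.Chars.strip p ≠ [])))

-- ===== PORT B =====
-- diff[lo] += 1; diff[hi] -= 1 for the span clipped to [0, n]
def bBump (n : Nat) (d : List Int) (se : Int × Int) : List Int :=
  let lo := max se.1 0
  let hi := min se.2 (n : Int)
  if lo < hi then
    let d1 := PySem.List.pySetD d lo (PySem.List.pyGetD d lo 0 + 1)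
    PySem.List.pySetD d1 hi (PySem.List.pyGetD d1 hi 0 - 1)
  else d

-- state step for B's sweep: running depth plus (parts, buf)
def bStep (diff : List Int) (st : Int × List (List Char) × List Char) (ic : Int × Char) :
    Int × List (List Char) × List Char :=
  let depth := st.1 + PySem.List.pyGetD diff ic.1 0
  if depth = 0 then (depth, st.2.1, st.2.2 ++ [ic.2])
  else if st.2.2 ≠ [] then (depth, st.2.1 ++ [st.2.2], ([] : List Char))
  else (depth, st.2.1, st.2.2)

def find_unparsed_py_alt (text : String) (spans : List (Int × Int)) : String :=
  if text = "" then "" else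
  let chars := text.toList
  let n := chars.length
  let diff := spans.foldl (bBump n) (List.replicate (n + 1) (0 : Int))
  let st := (PySem.List.enumerate chars).foldl (bStep diff) ((0 : Int), ([] : List (List Char)), ([] : List Char))
  let parts := if st.2.2 ≠ [] then st.2.1 ++ [st.2.2] else st.2.1
  String.ofList (PySem.Chars.join [' '] (parts.filter (fun p => PySem.Chars.strip p ≠ [])))

-- ===== PRECONDITION & SPEC =====
-- Pre_ restricts nonempty spans to in-bounds character positions 0 ≤ start, end ≤ len(text):
-- outside it A either raises IndexError (index past the text or below -len) or silently wraps a
-- negative start to the end of the text — Python negative indexing, outside the natural domain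
-- of character spans.  (Empty text returns "" before spans are read, hence the disjunct.)
def Pre_find_unparsed_py (text : String) (spans : List (Int × Int)) : Prop :=
  text = "" ∨ ∀ se ∈ spans, se.1 < se.2 → 0 ≤ se.1 ∧ se.2 ≤ (text.toList.length : Int)
instance (text : String) (spans : List (Int × Int)) : Decidable (Pre_find_unparsed_py text spans) := by
  unfold Pre_find_unparsed_py; infer_instance

def pvWitness_find_unparsed_py : String × (List (Int × Int)) := ("ab cd", [(0, 2), (3, 4)])

def Spec_find_unparsed_py (text : String) (spans : List (Int × Int)) (out : String) : Prop :=
  out = find_unparsed_py_alt text spans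
instance (text : String) (spans : List (Int × Int)) (out : String) : Decidable (Spec_find_unparsed_py text spans out) := by
  unfold Spec_find_unparsed_py; infer_instance

-- ===== CLAIM (what is proved, stated in full; the proofs are below) =====
def Claim_equal_find_unparsed_py : Prop := ∀ (text : String) (spans : List (Int × Int)), Dom_find_unparsed_py text spans → Pre_find_unparsed_py text spans → Spec_find_unparsed_py text spans (find_unparsed_py text spans)

-- ===== LEMMAS AND PROOFS =====

-- the coverage flag both sides compute
def covFlag (spans : List (Int × Int)) (j : Nat) : Bool :=
  spans.any (fun se => decide (se.1 ≤ (j : Int) ∧ (j : Int) < se.2))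

-- inner marking fold preserves length
lemma length_foldl_pySetD (l : List Int) : ∀ (c : List Bool),
    (l.foldl (fun c i => PySem.List.pySetD c i true) c).length = c.length := by
  induction l with
  | nil => intro c; rfl
  | cons x xs ih =>
    intro c
    simp only [List.foldl_cons, ih, PySem.List.length_pySetD]

lemma length_aMark (c : List Bool) (se : Int × Int) : (aMark c se).length = c.length := by
  simpa [aMark] using length_foldl_pySetD (PySem.List.pyRange se.1 se.2 1) c

lemma length_foldl_aMark (spans : List (Int × Int)) : ∀ (c : List Bool),
    (spans.foldl aMark c).length = c.length := by
  induction spans with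
  | nil => intro c; rfl
  | cons s ss ih => intro c; simp [List.foldl_cons, ih, length_aMark]

-- inner marking fold, pointwise
lemma mark_fold_getD (e : Int) : ∀ (k : Nat) (s : Int) (c : List Bool), (e - s).toNat = k →
    0 ≤ s → e ≤ (c.length : Int) → ∀ j : Nat,
    ((PySem.List.pyRange s e 1).foldl (fun c i => PySem.List.pySetD c i true) c).getD j false
      = (c.getD j false || decide (s ≤ (j : Int) ∧ (j : Int) < e)) := by
  intro k
  induction k with
  | zero =>
    intro s c hk hs he j
    have hse : e ≤ s := by omega
    rw [PySem.List.pyRange_one_eq_nil hse]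
    simp only [List.foldl_nil]
    have hno : ¬ (s ≤ (j : Int) ∧ (j : Int) < e) := by omega
    simp [hno]
  | succ k ih =>
    intro s c hk hs he j
    have hlt : s < e := by omega
    rw [PySem.List.pyRange_one_cons hlt, List.foldl_cons]
    have hset : PySem.List.pySetD c s true = c.set s.toNat true :=
      PySem.List.pySetD_of_nonneg c true hs
    have hlen : (((c.set s.toNat true).length : Nat) : Int) = (c.length : Int) := by simp
    rw [hset, ih (s+1) (c.set s.toNat true) (by omega) (by omega) (by rw [hlen]; exact he) j]
    have hsn : s.toNat < c.length := by omega
    by_cases hj : j = s.toNat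
    · subst hj
      have h1 : s ≤ ((s.toNat : Nat) : Int) ∧ ((s.toNat : Nat) : Int) < e := by
        constructor <;> omega
      simp [List.getD, hsn]
      exact Or.inr (by constructor <;> omega)
    · have hgd : (c.set s.toNat true).getD j false = c.getD j false := by
        simp [List.getD, Ne.symm hj]
      rw [hgd]
      have hne : (j : Int) ≠ s := by omega
      have hiff : (s < (j : Int)) ↔ (s ≤ (j : Int)) := by omega
      simp [hiff]

-- inner marking: pointwise effect of one span
lemma aMark_getD (s e : Int) (hs : 0 ≤ s) : ∀ (c : List Bool), e ≤ (c.length : Int) →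
    ∀ j : Nat, (aMark c (s, e)).getD j false
      = (c.getD j false || decide (s ≤ (j : Int) ∧ (j : Int) < e)) := by
  intro c he j
  exact mark_fold_getD e (e - s).toNat s c rfl hs he j

-- outer marking fold: pointwise coverage
lemma covered_getD (spans : List (Int × Int)) :
    ∀ (c : List Bool),
    (∀ se ∈ spans, se.1 < se.2 → 0 ≤ se.1 ∧ se.2 ≤ (c.length : Int)) →
    ∀ j : Nat, (spans.foldl aMark c).getD j false = (c.getD j false || covFlag spans j) := by
  induction spans with
  | nil => intro c _ j; simp [covFlag]
  | cons se ss ih =>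
    intro c hc j
    rw [List.foldl_cons]
    have hss : ∀ x ∈ ss, x.1 < x.2 → 0 ≤ x.1 ∧ x.2 ≤ ((aMark c se).length : Int) := by
      intro x hx h; rw [length_aMark]; exact hc x (List.mem_cons_of_mem _ hx) h
    rw [ih _ hss j]
    by_cases hse : se.1 < se.2
    · obtain ⟨h1, h2⟩ := hc se (List.mem_cons_self ..) hse
      have hm := aMark_getD se.1 se.2 h1 c h2 j
      rw [show aMark c se = aMark c (se.1, se.2) from rfl, hm]
      simp [covFlag, Bool.or_assoc]
    · have hid : aMark c se = c := by
        unfold aMark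
        rw [PySem.List.pyRange_one_eq_nil (by omega)]
        rfl
      rw [hid]
      have hd : (decide (se.1 ≤ (j : Int)) && decide ((j : Int) < se.2)) = false := by
        simp only [Bool.and_eq_false_iff, decide_eq_false_iff_not]; omega
      simp [covFlag, hd]

-- sum of a prefix after an in-bounds additive set
lemma sum_take_set : ∀ (d : List Int) (k : Nat) (v : Int), k < d.length → ∀ j : Nat,
    ((d.set k (d.getD k 0 + v)).take (j + 1)).sum
      = (d.take (j + 1)).sum + (if k ≤ j then v else 0) := by
  intro d
  induction d with
  | nil => intro k v hk; simp at hk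
  | cons x t ih =>
    intro k v hk j
    cases k with
    | zero =>
      simp only [List.getD_cons_zero, List.set_cons_zero, List.take_succ_cons, List.sum_cons,
        Nat.zero_le, if_pos]
      ring
    | succ k =>
      cases j with
      | zero =>
        simp
      | succ j =>
        have hk' : k < t.length := by simpa using hk
        simp only [List.set_cons_succ, List.take_succ_cons, List.sum_cons, List.getD_cons_succ]
        rw [ih k v hk' j]
        by_cases h : k ≤ j
        · rw [if_pos h, if_pos (Nat.succ_le_succ h)]; ring
        · rw [if_neg h, if_neg (fun hh => h (Nat.le_of_succ_le_succ hh))]; ring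

lemma length_bBump (n : Nat) (d : List Int) (se : Int × Int) : (bBump n d se).length = d.length := by
  unfold bBump
  dsimp only
  split_ifs <;> simp [PySem.List.length_pySetD]

-- prefix sums of the diff array count the covering spans
lemma diff_take_sum (n : Nat) (spans : List (Int × Int)) :
    ∀ (d : List Int), d.length = n + 1 → ∀ j : Nat, j < n →
    ((spans.foldl (bBump n) d).take (j + 1)).sum
      = (d.take (j + 1)).sum
        + (spans.countP (fun se => decide (se.1 ≤ (j : Int) ∧ (j : Int) < se.2)) : Int) := by
  induction spans with
  | nil => intro d hd j hj; simp
  | cons se ss ih =>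
    intro d hd j hj
    rw [List.foldl_cons, List.countP_cons]
    have hlen : (bBump n d se).length = n + 1 := by rw [length_bBump]; exact hd
    rw [ih (bBump n d se) hlen j hj]
    have hstep : ((bBump n d se).take (j + 1)).sum
        = (d.take (j + 1)).sum + (if se.1 ≤ (j : Int) ∧ (j : Int) < se.2 then 1 else 0) := by
      unfold bBump
      dsimp only
      by_cases hlh : max se.1 0 < min se.2 (n : Int)
      · rw [if_pos hlh]
        have h0lo : 0 ≤ max se.1 0 := le_max_right _ _
        have hlolen : (max se.1 0).toNat < d.length := by omega
        have h0hi : 0 ≤ min se.2 (n : Int) := by omega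
        have hhilen : (min se.2 (n : Int)).toNat < d.length := by omega
        have e1 : PySem.List.pySetD d (max se.1 0) (PySem.List.pyGetD d (max se.1 0) 0 + 1)
            = d.set (max se.1 0).toNat (d.getD (max se.1 0).toNat 0 + 1) := by
          rw [PySem.List.pySetD_of_nonneg d _ h0lo,
            PySem.List.pyGetD_eq_getElem d 0 h0lo (by omega),
            List.getD_eq_getElem d 0 hlolen]
        rw [e1]
        set d1 := d.set (max se.1 0).toNat (d.getD (max se.1 0).toNat 0 + 1) with hd1
        have hlen1 : d1.length = d.length := by rw [hd1]; simp
        have hhilen1 : (min se.2 (n : Int)).toNat < d1.length := by rw [hlen1]; omega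
        have e2 : PySem.List.pySetD d1 (min se.2 (n : Int))
              (PySem.List.pyGetD d1 (min se.2 (n : Int)) 0 - 1)
            = d1.set (min se.2 (n : Int)).toNat (d1.getD (min se.2 (n : Int)).toNat 0 + (-1)) := by
          rw [PySem.List.pySetD_of_nonneg d1 _ h0hi,
            PySem.List.pyGetD_eq_getElem d1 0 h0hi (by rw [hlen1] at hhilen1 ⊢; omega),
            List.getD_eq_getElem d1 0 hhilen1]
          ring_nf
        rw [e2, sum_take_set d1 (min se.2 (n : Int)).toNat (-1) hhilen1 j, hd1,
          sum_take_set d (max se.1 0).toNat 1 hlolen j]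
        split_ifs <;> omega
      · rw [if_neg hlh]
        have hno : ¬ (se.1 ≤ (j : Int) ∧ (j : Int) < se.2) := by omega
        rw [if_neg hno, add_zero]
    rw [hstep]
    push_cast
    by_cases hp : se.1 ≤ (j : Int) ∧ (j : Int) < se.2
    · rw [if_pos hp, if_pos (by simpa using hp)]; ring
    · rw [if_neg hp, if_neg (by simpa using hp)]; ring

-- splitting a prefix sum of a dropped list
lemma sum_take_drop_succ (diff : List Int) (i m : Nat) :
    ((diff.drop i).take (m + 1)).sum = diff.getD i 0 + ((diff.drop (i + 1)).take m).sum := by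
  by_cases h : i < diff.length
  · rw [List.drop_eq_getElem_cons h, List.take_succ_cons, List.sum_cons,
      List.getD_eq_getElem _ _ h]
  · rw [List.drop_eq_nil_of_le (by omega), List.drop_eq_nil_of_le (by omega),
      List.getD_eq_default _ _ (by omega)]
    simp

-- phase-2 correspondence: A's zip fold equals B's enumerate fold with running depth
lemma core (cs : List Char) : ∀ (bs : List Bool) (diff : List Int) (i : Nat) (dep : Int)
    (parts : List (List Char)) (buf : List Char),
    bs.length = cs.length →
    (∀ j, j < cs.length →
      bs.getD j false = decide (dep + ((diff.drop i).take (j + 1)).sum ≠ 0)) →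
    (cs.zip bs).foldl aStep (parts, buf)
      = (((PySem.List.enumerate cs (i : Int)).foldl (bStep diff) (dep, parts, buf)).2.1,
         ((PySem.List.enumerate cs (i : Int)).foldl (bStep diff) (dep, parts, buf)).2.2) := by
  induction cs with
  | nil =>
    intro bs diff i dep parts buf hlen hyp
    simp [PySem.List.enumerate_nil]
  | cons c cs ih =>
    intro bs diff i dep parts buf hlen hyp
    cases bs with
    | nil => simp at hlen
    | cons b bs =>
      rw [List.zip_cons_cons, List.foldl_cons, PySem.List.enumerate_cons, List.foldl_cons]
      have hb : b = decide (dep + diff.getD i 0 ≠ 0) := by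
        have h0 := hyp 0 (by simp)
        rw [List.getD_cons_zero] at h0
        rw [h0, sum_take_drop_succ diff i 0]
        simp
      have hyp' : ∀ j, j < cs.length →
          bs.getD j false
            = decide ((dep + diff.getD i 0) + ((diff.drop (i + 1)).take (j + 1)).sum ≠ 0) := by
        intro j hj
        have h1 := hyp (j + 1) (by simpa using Nat.succ_lt_succ hj)
        rw [List.getD_cons_succ] at h1
        rw [h1, sum_take_drop_succ diff i (j + 1)]
        ring_nf
      have hcast : (i : Int) + 1 = ((i + 1 : Nat) : Int) := by push_cast; ring
      have hstepB : bStep diff (dep, parts, buf) ((i : Int), c)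
          = (dep + diff.getD i 0,
             (aStep (parts, buf) (c, b)).1, (aStep (parts, buf) (c, b)).2) := by
        simp only [bStep, aStep, PySem.List.pyGetD_natCast]
        by_cases hd : dep + diff.getD i 0 = 0
        · have hbf : b = false := by rw [hb]; simpa using hd
          rw [if_pos hd, hbf]
          simp
        · have hbt : b = true := by rw [hb]; simpa using hd
          rw [if_neg hd, hbt]
          by_cases hbuf : buf = [] <;> simp [hbuf]
      rw [hstepB, hcast]
      exact ih bs diff (i + 1) (dep + diff.getD i 0)
        (aStep (parts, buf) (c, b)).1 (aStep (parts, buf) (c, b)).2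
        (by simpa using hlen) hyp'

-- diff fold preserves length
lemma length_foldl_bBump (n : Nat) (spans : List (Int × Int)) : ∀ (d : List Int),
    (spans.foldl (bBump n) d).length = d.length := by
  induction spans with
  | nil => intro d; rfl
  | cons se ss ih => intro d; rw [List.foldl_cons, ih, length_bBump]

-- ===== VERDICT (by name: the statement is the Claim_ definition above) =====
theorem find_unparsed_py_spec : Claim_equal_find_unparsed_py := by
  intro text spans _ hpre
  unfold Spec_find_unparsed_py find_unparsed_py find_unparsed_py_alt
  by_cases htext : text = ""
  · rw [if_pos htext, if_pos htext]
  · rw [if_neg htext, if_neg htext]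
    dsimp only
    set cs := text.toList with hcs
    set n := cs.length with hn
    set cov := spans.foldl aMark (List.replicate n false) with hcovdef
    set diff := spans.foldl (bBump n) (List.replicate (n + 1) (0 : Int)) with hdiffdef
    have hpre' : ∀ se ∈ spans, se.1 < se.2 → 0 ≤ se.1 ∧ se.2 ≤ (n : Int) :=
      hpre.resolve_left htext
    have hcovlen : cov.length = n := by
      rw [hcovdef, length_foldl_aMark, List.length_replicate]
    have hcov : ∀ j : Nat, cov.getD j false = covFlag spans j := by
      intro j
      rw [hcovdef, covered_getD spans _ (by simpa using hpre') j]
      simp [List.getD]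
    have hdifflen : diff.length = n + 1 := by
      rw [hdiffdef, length_foldl_bBump, List.length_replicate]
    have hflag : ∀ j : Nat, j < n →
        decide ((0 : Int) + ((diff.drop 0).take (j + 1)).sum ≠ 0) = covFlag spans j := by
      intro j hj
      rw [List.drop_zero, hdiffdef,
        diff_take_sum n spans (List.replicate (n + 1) 0) (by simp) j hj]
      have hz : ((List.replicate (n + 1) (0 : Int)).take (j + 1)).sum = 0 := by
        simp [List.take_replicate]
      rw [hz]
      unfold covFlag
      cases ha : spans.any (fun se => decide (se.1 ≤ (j : Int) ∧ (j : Int) < se.2)) with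
      | true =>
        obtain ⟨x, hx, hpx⟩ := List.any_eq_true.mp ha
        have hpos : 0 < spans.countP (fun se => decide (se.1 ≤ (j : Int) ∧ (j : Int) < se.2)) :=
          List.countP_pos_iff.mpr ⟨x, hx, hpx⟩
        simp only [decide_eq_true_eq]
        omega
      | false =>
        have hall := List.any_eq_false.mp ha
        have hcz : spans.countP (fun se => decide (se.1 ≤ (j : Int) ∧ (j : Int) < se.2)) = 0 :=
          List.countP_eq_zero.mpr hall
        simp only [decide_eq_false_iff_not, not_not]
        omega
    have hkey := core cs cov diff 0 0 [] [] hcovlen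
      (fun j hj => by rw [hcov j, hflag j (by omega)])
    rw [hkey]
    norm_num
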